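-- pv_equiv track=rewrite | github.com/tamiemognato/GRASP-PRVCRD | SavingsHeuristicClarkeAndWrightFunctions.py | TesteSeAOutraArestaJaEstaEmUmaRotaDeLenMaiorQueTres
-- ===== SOURCE A (Python) =====
-- def TesteSeAOutraArestaJaEstaEmUmaRotaDeLenMaiorQueTres(aresta,rotas):
--     ArestaZeroJaEstaEmUmaRotaDeLenMaiorQueTres = False
--     ArestaUmJaEstaEmUmaRotaDeLenMaiorQueTres = False
--     contatorArestaZero = 0
--     contadorArestaUm = 0
--     for rota in rotas:
--         if aresta[0] in rota and len(rota) > 3: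
--             contatorArestaZero = contatorArestaZero + 1
--
--         if aresta[1] in rota and len(rota) > 3:
--             contadorArestaUm = contadorArestaUm + 1
--
--     if contatorArestaZero > 0:
--         ArestaZeroJaEstaEmUmaRotaDeLenMaiorQueTres = True
--
--     if contadorArestaUm > 0:
--         ArestaUmJaEstaEmUmaRotaDeLenMaiorQueTres = True
--
--     return ArestaZeroJaEstaEmUmaRotaDeLenMaiorQueTres, ArestaUmJaEstaEmUmaRotaDeLenMaiorQueTres
-- ===== SOURCE B (Python) =====
-- def TesteSeAOutraArestaJaEstaEmUmaRotaDeLenMaiorQueTres(aresta, rotas):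
--     nodes = set()
--     for rota in rotas:
--         if len(rota) > 3:
--             nodes.update(rota)
--     return aresta[0] in nodes, aresta[1] in nodes
-- ===== Notes on version B (the rewrite author's own statement) =====
-- stated objective: idiomatic
-- what changed: Replaces the per-route double membership test with two counters by one pass that builds a set of all nodes appearing in routes longer than three, then answers both questions with two set lookups.
-- outside the precondition, e.g. on TesteSeAOutraArestaJaEstaEmUmaRotaDeLenMaiorQueTres([], []): A returns (False, False), B raises IndexError
import Mathlib
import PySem

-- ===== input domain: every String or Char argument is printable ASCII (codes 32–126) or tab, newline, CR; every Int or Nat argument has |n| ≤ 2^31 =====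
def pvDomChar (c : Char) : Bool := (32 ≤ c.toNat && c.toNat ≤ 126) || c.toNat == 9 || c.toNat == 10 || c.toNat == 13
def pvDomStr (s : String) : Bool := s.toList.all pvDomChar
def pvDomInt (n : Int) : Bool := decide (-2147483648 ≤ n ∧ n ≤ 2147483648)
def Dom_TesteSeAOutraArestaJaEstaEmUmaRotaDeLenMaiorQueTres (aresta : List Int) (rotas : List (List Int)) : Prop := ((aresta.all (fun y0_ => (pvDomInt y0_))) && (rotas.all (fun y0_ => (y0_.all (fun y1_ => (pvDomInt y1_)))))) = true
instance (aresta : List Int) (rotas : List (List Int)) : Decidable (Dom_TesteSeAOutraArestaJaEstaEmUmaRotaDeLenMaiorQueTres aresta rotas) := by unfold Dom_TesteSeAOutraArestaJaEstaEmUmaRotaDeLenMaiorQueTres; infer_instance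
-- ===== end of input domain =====

-- B builds a set of all nodes occurring in routes longer than three in one pass, then answers
-- both endpoint questions by set membership (idiomatic restructuring; same asymptotic cost).

-- ===== PORT A =====
def TesteSeAOutraArestaJaEstaEmUmaRotaDeLenMaiorQueTres (aresta : List Int) (rotas : List (List Int)) : Bool × Bool :=
  -- two counters, incremented per route containing the endpoint when len(rota) > 3
  let c := rotas.foldl (fun (c : Int × Int) rota =>
    let c0 := if rota.contains (PySem.List.pyGetD aresta 0 0) && decide (3 < rota.length) then c.1 + 1 else c.1
    let c1 := if rota.contains (PySem.List.pyGetD aresta 1 0) && decide (3 < rota.length) then c.2 + 1 else c.2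
    (c0, c1)) (0, 0)
  (decide (0 < c.1), decide (0 < c.2))

-- ===== PORT B =====
def TesteSeAOutraArestaJaEstaEmUmaRotaDeLenMaiorQueTres_alt (aresta : List Int) (rotas : List (List Int)) : Bool × Bool :=
  let nodes : PySem.Set Int := rotas.foldl
    (fun (s : PySem.Set Int) rota => if 3 < rota.length then PySem.Set.update s rota else s)
    PySem.Set.empty
  (PySem.Set.contains nodes (PySem.List.pyGetD aresta 0 0),
   PySem.Set.contains nodes (PySem.List.pyGetD aresta 1 0))

-- ===== PRECONDITION & SPEC =====
-- Pre_ excludes edges with fewer than two endpoints: there A raises IndexError whenever rotas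
-- is non-empty (and only returns (False, False) by accident when rotas is empty), while B's
-- unconditional aresta[0]/aresta[1] lookups raise IndexError.
def Pre_TesteSeAOutraArestaJaEstaEmUmaRotaDeLenMaiorQueTres (aresta : List Int) (rotas : List (List Int)) : Prop := 2 ≤ aresta.length
instance (aresta : List Int) (rotas : List (List Int)) : Decidable (Pre_TesteSeAOutraArestaJaEstaEmUmaRotaDeLenMaiorQueTres aresta rotas) := by unfold Pre_TesteSeAOutraArestaJaEstaEmUmaRotaDeLenMaiorQueTres; infer_instance
def pvWitness_TesteSeAOutraArestaJaEstaEmUmaRotaDeLenMaiorQueTres : List Int × List (List Int) := ([1, 2], [[1, 3, 4, 5], [2, 6]])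
def Spec_TesteSeAOutraArestaJaEstaEmUmaRotaDeLenMaiorQueTres (aresta : List Int) (rotas : List (List Int)) (out : Bool × Bool) : Prop := out = TesteSeAOutraArestaJaEstaEmUmaRotaDeLenMaiorQueTres_alt aresta rotas
instance (aresta : List Int) (rotas : List (List Int)) (out : Bool × Bool) : Decidable (Spec_TesteSeAOutraArestaJaEstaEmUmaRotaDeLenMaiorQueTres aresta rotas out) := by unfold Spec_TesteSeAOutraArestaJaEstaEmUmaRotaDeLenMaiorQueTres; infer_instance

-- ===== CLAIM (what is proved, stated in full; the proofs are below) =====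
def Claim_equal_TesteSeAOutraArestaJaEstaEmUmaRotaDeLenMaiorQueTres : Prop := ∀ (aresta : List Int) (rotas : List (List Int)), Dom_TesteSeAOutraArestaJaEstaEmUmaRotaDeLenMaiorQueTres aresta rotas → Pre_TesteSeAOutraArestaJaEstaEmUmaRotaDeLenMaiorQueTres aresta rotas → Spec_TesteSeAOutraArestaJaEstaEmUmaRotaDeLenMaiorQueTres aresta rotas (TesteSeAOutraArestaJaEstaEmUmaRotaDeLenMaiorQueTres aresta rotas)

-- ===== LEMMAS AND PROOFS =====

-- A's counter for endpoint x0 (first component) is positive iff some route contains x0 and is long.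
theorem pv_countA (x0 x1 : Int) : ∀ (rotas : List (List Int)) (c : Int × Int),
    let r := rotas.foldl (fun (c : Int × Int) rota =>
      let c0 := if rota.contains x0 && decide (3 < rota.length) then c.1 + 1 else c.1
      let c1 := if rota.contains x1 && decide (3 < rota.length) then c.2 + 1 else c.2
      (c0, c1)) c
    (0 ≤ c.1 → (0 < r.1 ↔ 0 < c.1 ∨ ∃ ro ∈ rotas, x0 ∈ ro ∧ 3 < ro.length)) ∧
    (0 ≤ c.2 → (0 < r.2 ↔ 0 < c.2 ∨ ∃ ro ∈ rotas, x1 ∈ ro ∧ 3 < ro.length)) := by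
  intro rotas
  induction rotas with
  | nil => intro c; simp
  | cons ro rest ih =>
    intro c
    simp only [List.foldl_cons]
    constructor
    · intro hc
      rcases ih _ with ⟨ih1, _⟩
      rw [ih1 (by dsimp; split_ifs <;> omega)]
      dsimp
      by_cases hm : ro.contains x0 && decide (3 < ro.length)
      · simp only [hm, if_true]
        simp only [Bool.and_eq_true, List.contains_iff_mem, decide_eq_true_eq] at hm
        constructor
        · intro _; exact Or.inr ⟨ro, by simp, hm.1, hm.2⟩
        · intro _; left; omega
      · simp only [hm]
        constructor
        · rintro (h | ⟨r, hr, hx, hl⟩)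
          · exact Or.inl h
          · exact Or.inr ⟨r, List.mem_cons_of_mem _ hr, hx, hl⟩
        · rintro (h | ⟨r, hr, hx, hl⟩)
          · exact Or.inl h
          · rcases List.mem_cons.mp hr with h' | h'
            · exact absurd (by simp [h' ▸ hx, h' ▸ hl] : (ro.contains x0 && decide (3 < ro.length)) = true) hm
            · exact Or.inr ⟨r, h', hx, hl⟩
    · intro hc
      rcases ih _ with ⟨_, ih2⟩
      rw [ih2 (by dsimp; split_ifs <;> omega)]
      dsimp
      by_cases hm : ro.contains x1 && decide (3 < ro.length)
      · simp only [hm, if_true]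
        simp only [Bool.and_eq_true, List.contains_iff_mem, decide_eq_true_eq] at hm
        constructor
        · intro _; exact Or.inr ⟨ro, by simp, hm.1, hm.2⟩
        · intro _; left; omega
      · simp only [hm]
        constructor
        · rintro (h | ⟨r, hr, hx, hl⟩)
          · exact Or.inl h
          · exact Or.inr ⟨r, List.mem_cons_of_mem _ hr, hx, hl⟩
        · rintro (h | ⟨r, hr, hx, hl⟩)
          · exact Or.inl h
          · rcases List.mem_cons.mp hr with h' | h'
            · exact absurd (by simp [h' ▸ hx, h' ▸ hl] : (ro.contains x1 && decide (3 < ro.length)) = true) hm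
            · exact Or.inr ⟨r, h', hx, hl⟩

-- B's set after the pass contains x iff x is in the seed or in some long route.
theorem pv_memB (x : Int) : ∀ (rotas : List (List Int)) (s : PySem.Set Int),
    (x ∈ rotas.foldl (fun (s : PySem.Set Int) rota => if 3 < rota.length then PySem.Set.update s rota else s) s
      ↔ x ∈ s ∨ ∃ ro ∈ rotas, x ∈ ro ∧ 3 < ro.length) := by
  intro rotas
  induction rotas with
  | nil => intro s; simp
  | cons ro rest ih =>
    intro s
    simp only [List.foldl_cons]
    rw [ih]
    by_cases hl : 3 < ro.length
    · simp only [hl, if_true, PySem.Set.mem_update]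
      constructor
      · rintro ((h | h) | ⟨r, hr, hx, hlr⟩)
        · exact Or.inl h
        · exact Or.inr ⟨ro, by simp, h, hl⟩
        · exact Or.inr ⟨r, List.mem_cons_of_mem _ hr, hx, hlr⟩
      · rintro (h | ⟨r, hr, hx, hlr⟩)
        · exact Or.inl (Or.inl h)
        · rcases List.mem_cons.mp hr with h' | h'
          · exact Or.inl (Or.inr (h' ▸ hx))
          · exact Or.inr ⟨r, h', hx, hlr⟩
    · simp only [hl, if_false]
      constructor
      · rintro (h | ⟨r, hr, hx, hlr⟩)
        · exact Or.inl h
        · exact Or.inr ⟨r, List.mem_cons_of_mem _ hr, hx, hlr⟩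
      · rintro (h | ⟨r, hr, hx, hlr⟩)
        · exact Or.inl h
        · rcases List.mem_cons.mp hr with h' | h'
          · exact absurd (h' ▸ hlr) hl
          · exact Or.inr ⟨r, h', hx, hlr⟩

-- ===== VERDICT (by name: the statement is the Claim_ definition above) =====
theorem TesteSeAOutraArestaJaEstaEmUmaRotaDeLenMaiorQueTres_spec : Claim_equal_TesteSeAOutraArestaJaEstaEmUmaRotaDeLenMaiorQueTres := by
  intro aresta rotas _ _
  unfold Spec_TesteSeAOutraArestaJaEstaEmUmaRotaDeLenMaiorQueTres
  unfold TesteSeAOutraArestaJaEstaEmUmaRotaDeLenMaiorQueTres TesteSeAOutraArestaJaEstaEmUmaRotaDeLenMaiorQueTres_alt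
  set x0 := PySem.List.pyGetD aresta 0 0
  set x1 := PySem.List.pyGetD aresta 1 0
  rcases pv_countA x0 x1 rotas (0, 0) with ⟨h1, h2⟩
  apply Prod.ext
  · show decide _ = PySem.Set.contains _ _
    rw [Bool.eq_iff_iff]
    simp only [decide_eq_true_eq, PySem.Set.contains_iff]
    rw [h1 (by norm_num), pv_memB]
    simp [and_comm]
  · show decide _ = PySem.Set.contains _ _
    rw [Bool.eq_iff_iff]
    simp only [decide_eq_true_eq, PySem.Set.contains_iff]
    rw [h2 (by norm_num), pv_memB]
    simp [and_comm]
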